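-- pv_equiv track=rewrite | github.com/HanKyeon/TIL-Today-I-Learned | 역테/A1.py | watering
-- ===== SOURCE A (Python) =====
-- def watering(tree_heights):
--     biggest_tree = max(tree_heights) # 첫째날 가장 큰 나무
--     if biggest_tree == min(tree_heights): # 가장 큰 나무가 가장 작은 나무와 같다면
--         return 0 # 0일이 걸린다.
--     # 자라야 할 부분으로 리스트 만들기.
--     growing_hieghts = list(map(lambda x: biggest_tree-x, tree_heights))
--     count_of_2, count_of_1 = 0, 0
--     # 필요한 2의 갯수와 1의 갯수 세어주기
--     for now_height in growing_hieghts: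
--         count_of_2 += now_height // 2
--         count_of_1 += now_height % 2
--     # 2의 갯수가 2개 이상 더 많을 때, 1의 갯수로 바꿔주기.
--     while count_of_2 - count_of_1 >= 2:
--         count_of_2 -= 1
--         count_of_1 += 2
--     # 반환
--     if count_of_2 == count_of_1:
--         return count_of_2 * 2
--     if count_of_2 - count_of_1 == 1:
--         return count_of_2 * 2
--     if count_of_1 > count_of_2:
--         return count_of_1 * 2 - 1
-- ===== SOURCE B (Python) =====
-- def watering(tree_heights):
--     m = max(tree_heights)
--     if m == min(tree_heights):
--         return 0
--     total = 0
--     c1 = 0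
--     for x in tree_heights:
--         d = m - x
--         total += d
--         c1 += d % 2
--     c2 = (total - c1) // 2
--     diff = c2 - c1
--     if diff >= 2:
--         k = (diff + 1) // 3
--         c2 -= k
--         c1 += 2 * k
--     return c2 * 2 if c2 >= c1 else c1 * 2 - 1
-- ===== Notes on version B (the rewrite author's own statement) =====
-- stated objective: faster
-- what changed: Replaced A's step-by-step while loop that converts surplus 2-waterings into 1-waterings one at a time with a closed-form division computing the adjustment count k=(c2-c1+1)//3 in one step, and computed c2 from the total deficit instead of per-element floordivs.
import Mathlib
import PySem

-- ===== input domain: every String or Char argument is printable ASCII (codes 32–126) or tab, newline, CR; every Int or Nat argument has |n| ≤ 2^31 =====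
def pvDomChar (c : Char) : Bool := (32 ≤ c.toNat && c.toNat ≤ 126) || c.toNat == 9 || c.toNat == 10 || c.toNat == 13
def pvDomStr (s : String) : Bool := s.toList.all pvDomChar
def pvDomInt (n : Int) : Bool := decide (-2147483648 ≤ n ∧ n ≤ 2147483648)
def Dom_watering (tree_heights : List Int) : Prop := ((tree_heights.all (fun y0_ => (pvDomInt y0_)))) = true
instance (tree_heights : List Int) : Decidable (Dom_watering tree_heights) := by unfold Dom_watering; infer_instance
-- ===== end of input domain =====

-- B replaces A's one-step-at-a-time while loop with a closed-form division (objective: faster).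

-- ===== PORT A =====
-- the 'while count_of_2 - count_of_1 >= 2' loop of A, step for step
def wateringLoopA (c2 c1 : Int) : Int × Int :=
  if c2 - c1 ≥ 2 then wateringLoopA (c2 - 1) (c1 + 2) else (c2, c1)
termination_by (c2 - c1).toNat
decreasing_by omega

def watering (tree_heights : List Int) : Int :=
  match PySem.List.max? tree_heights (fun y => y), PySem.List.min? tree_heights (fun y => y) with
  | some biggest, some smallest =>
    if biggest = smallest then 0
    else
      let growing := tree_heights.map (fun x => biggest - x)
      let p := growing.foldl
        (fun (acc : Int × Int) h =>
          (acc.1 + PySem.Int.floordiv h 2, acc.2 + PySem.Int.mod h 2)) (0, 0)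
      let q := wateringLoopA p.1 p.2
      if q.1 = q.2 then q.1 * 2
      else if q.1 - q.2 = 1 then q.1 * 2
      else if q.2 > q.1 then q.2 * 2 - 1
      else 0  -- unreachable: Python would fall off and return None, but the loop guarantees q.1 - q.2 ≤ 1
  | _, _ => 0  -- unreachable under Pre_ (Python raises ValueError on [])

-- ===== PORT B =====
def watering_alt (tree_heights : List Int) : Int :=
  match PySem.List.max? tree_heights (fun y => y) with
  | none => 0  -- unreachable under Pre_
  | some m =>
  match PySem.List.min? tree_heights (fun y => y) with
  | none => 0  -- unreachable under Pre_
  | some n =>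
    if m = n then 0
    else
      let s := tree_heights.foldl
        (fun (acc : Int × Int) x =>
          let d := m - x
          (acc.1 + d, acc.2 + PySem.Int.mod d 2)) (0, 0)
      let c2 := PySem.Int.floordiv (s.1 - s.2) 2
      let c1 := s.2
      let diff := c2 - c1
      let (c2, c1) :=
        if diff ≥ 2 then
          let k := PySem.Int.floordiv (diff + 1) 3
          (c2 - k, c1 + 2 * k)
        else (c2, c1)
      if c2 ≥ c1 then c2 * 2 else c1 * 2 - 1

-- ===== PRECONDITION & SPEC =====
-- Pre_ excludes only the empty list, on which Python A raises ValueError (max of empty sequence).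
def Pre_watering (tree_heights : List Int) : Prop := tree_heights ≠ []
instance (tree_heights : List Int) : Decidable (Pre_watering tree_heights) := by unfold Pre_watering; infer_instance
def pvWitness_watering : List Int := [1, 2, 4]

def Spec_watering (tree_heights : List Int) (out : Int) : Prop := out = watering_alt tree_heights
instance (tree_heights : List Int) (out : Int) : Decidable (Spec_watering tree_heights out) := by unfold Spec_watering; infer_instance

-- ===== CLAIM (what is proved, stated in full; the proofs are below) =====
def Claim_equal_watering : Prop := ∀ (tree_heights : List Int), Dom_watering tree_heights → Pre_watering tree_heights → Spec_watering tree_heights (watering tree_heights)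

-- ===== LEMMAS AND PROOFS =====

lemma watering_loop_closed (c2 c1 : Int) :
    wateringLoopA c2 c1 =
      if c2 - c1 ≥ 2 then
        (c2 - PySem.Int.floordiv (c2 - c1 + 1) 3, c1 + 2 * PySem.Int.floordiv (c2 - c1 + 1) 3)
      else (c2, c1) := by
  induction c2, c1 using wateringLoopA.induct with
  | case1 c2 c1 h ih =>
    rw [wateringLoopA]
    simp only [h, if_pos, ih]
    rw [PySem.Int.floordiv_eq_ediv_of_pos (a := c2 - 1 - (c1 + 2) + 1) (by omega),
        PySem.Int.floordiv_eq_ediv_of_pos (a := c2 - c1 + 1) (by omega)]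
    split_ifs <;> simp_all <;> constructor <;> omega
  | case2 c2 c1 h =>
    rw [wateringLoopA]
    simp [h]

lemma watering_sum_split (m : Int) (l : List Int) :
    (l.map (fun x => m - x)).sum =
      2 * (l.map (fun x => PySem.Int.floordiv (m - x) 2)).sum
        + (l.map (fun x => PySem.Int.mod (m - x) 2)).sum := by
  induction l with
  | nil => simp
  | cons x t ih =>
    simp only [List.map_cons, List.sum_cons, ih]
    have := PySem.Int.floordiv_mul_add_mod (m - x) 2
    ring_nf
    omega

-- ===== VERDICT (by name: the statement is the Claim_ definition above) =====
theorem watering_spec : Claim_equal_watering := by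
  intro ts _ hpre
  unfold Spec_watering watering watering_alt
  cases hmax : PySem.List.max? ts (fun y => y) with
  | none => exact absurd ((PySem.List.max?_eq_none_iff _ _).mp hmax) hpre
  | some m =>
  cases hmin : PySem.List.min? ts (fun y => y) with
  | none => exact absurd ((PySem.List.min?_eq_none_iff _ _).mp hmin) hpre
  | some n =>
  simp only []
  by_cases hmn : m = n
  · simp [hmn]
  · simp only [if_neg hmn]
    -- reduce both folds to sums
    rw [List.foldl_map]
    rw [PySem.List.foldl_prod_mk
        (f := fun acc x => acc + PySem.Int.floordiv (m - x) 2)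
        (g := fun acc x => acc + PySem.Int.mod (m - x) 2),
      PySem.List.foldl_prod_mk
        (f := fun acc x => acc + (m - x))
        (g := fun acc x => acc + PySem.Int.mod (m - x) 2)]
    rw [PySem.List.foldl_add (g := fun x => PySem.Int.floordiv (m - x) 2),
      PySem.List.foldl_add (g := fun x => PySem.Int.mod (m - x) 2),
      PySem.List.foldl_add (g := fun x => m - x)]
    set S2 := (ts.map (fun x => PySem.Int.floordiv (m - x) 2)).sum with hS2
    set S1 := (ts.map (fun x => PySem.Int.mod (m - x) 2)).sum with hS1
    set S := (ts.map (fun x => m - x)).sum with hS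
    have hsplit : S = 2 * S2 + S1 := watering_sum_split m ts
    simp only [zero_add]
    have hc2 : PySem.Int.floordiv (S - S1) 2 = S2 := by
      rw [hsplit, PySem.Int.floordiv_eq_ediv_of_pos (by omega)]
      omega
    rw [hc2, watering_loop_closed]
    by_cases hd : S2 - S1 ≥ 2
    · simp only [if_pos hd]
      set k := PySem.Int.floordiv (S2 - S1 + 1) 3 with hk
      have hkb : 3 * k ≤ S2 - S1 + 1 ∧ S2 - S1 + 1 < 3 * k + 3 := by
        rw [hk, PySem.Int.floordiv_eq_ediv_of_pos (by omega)]
        omega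
      split_ifs <;> omega
    · simp only [if_neg hd]
      split_ifs <;> omega
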